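-- pv_equiv track=rewrite | github.com/albornet/chempred_revision | figures/fig4/fig4.py | cluster_by_num_reagents
-- ===== SOURCE A (Python) =====
-- from collections import defaultdict
-- from typing import List, Tuple, Dict, Union
--
-- def cluster_by_num_reagents(leading_lists: List[List[List[str]]],
--                             subordinate_lists: List[List[List[str]]])\
--                             -> Dict[int, List[Tuple[List[List[str]],
--                                List[List[str]]]]]:
--     """
--     Cluster a nested list of lists by the number of elements in the leading list
--
--     Parameters:
--         leading_lists (List[List[List[str]]]): A nested list of lists of list
--         of leading strings
--         subordinate_lists (List[List[List[str]]]): A nested list of lists of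
--         lists of subordinate strings
--
--     Returns:
--         A dictionary where keys are the number of elements in the leading list,
--         and the values are the lists of tuples where tuple includes the leading
--         lists and subordinate lists that match that number of elements.
--     """
--     # Create a defaultdict to store the clusters
--     clusters = defaultdict(list)
--     # Iterate over the leading and subordinate lists
--     for leading_sublist1, subordinate_sublist1 in zip(leading_lists,
--                                                       subordinate_lists):
--         # Iterate over the leading sublists in the outer list
--         for leading_sublist2 in leading_sublist1:
--             # Get the length of the leading_sublist2
--             subsublist_len = len(leading_sublist2)
--             # Append the tuple of leading and subordinate sublists
--             # to the appropriate cluster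
--             clusters[subsublist_len].append(
--                 (leading_sublist1, subordinate_sublist1))
--     # Sort the clusters by key and return as a dictionary
--     return dict(sorted(clusters.items()))
-- ===== SOURCE B (Python) =====
-- def cluster_by_num_reagents(leading_lists, subordinate_lists):
--     # Flatten once into (length, pair) entries, then build the result per sorted distinct length.
--     entries = [(len(l2), (l1, s1))
--                for l1, s1 in zip(leading_lists, subordinate_lists)
--                for l2 in l1]
--     keys = sorted({k for k, _ in entries})
--     return {k: [p for q, p in entries if q == k] for k in keys}
-- ===== Notes on version B (the rewrite author's own statement) =====
-- stated objective: simpler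
-- what changed: Replaces A's defaultdict bucketing plus a final sort of items with a flat list of (length, pair) entries, a sorted set of the distinct lengths, and one filter per key to build the result dict directly.
import Mathlib
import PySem

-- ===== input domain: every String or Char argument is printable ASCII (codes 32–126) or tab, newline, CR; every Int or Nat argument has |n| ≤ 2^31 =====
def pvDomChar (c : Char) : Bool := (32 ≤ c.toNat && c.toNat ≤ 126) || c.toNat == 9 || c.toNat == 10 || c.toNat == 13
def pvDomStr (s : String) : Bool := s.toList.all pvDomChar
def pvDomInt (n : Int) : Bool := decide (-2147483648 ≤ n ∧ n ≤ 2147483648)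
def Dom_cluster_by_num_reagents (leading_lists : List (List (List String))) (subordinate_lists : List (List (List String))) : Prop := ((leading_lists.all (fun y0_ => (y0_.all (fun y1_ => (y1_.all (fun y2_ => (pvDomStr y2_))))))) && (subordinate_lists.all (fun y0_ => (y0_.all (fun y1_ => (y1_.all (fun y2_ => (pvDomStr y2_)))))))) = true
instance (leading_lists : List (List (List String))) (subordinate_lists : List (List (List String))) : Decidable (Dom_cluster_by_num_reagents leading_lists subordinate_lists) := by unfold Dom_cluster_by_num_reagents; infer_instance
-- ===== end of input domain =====

-- B replaces A's defaultdict bucketing with one flat (length, pair) entry list, sorted distinct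
-- keys and a per-key filter — simpler: no dict at all. Equivalence is exact (no Pre_ needed).

-- ===== PORT A =====
def cluster_by_num_reagents (leading_lists : List (List (List String))) (subordinate_lists : List (List (List String))) : List (Int × List (List (List String) × List (List String))) :=
  -- clusters = defaultdict(list); nested loop appends (l1, s1) to clusters[len(l2)]
  let clusters := (leading_lists.zip subordinate_lists).foldl
    (fun d p => p.1.foldl (fun d l2 => d.modify (PySem.List.len l2) [] (fun v => v ++ [p])) d)
    PySem.Dict.empty
  -- dict(sorted(clusters.items())): dict keys are distinct ints, so Python's tuple comparison
  -- only ever reads the first component — ported as a sort keyed on the key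
  PySem.List.sorted clusters.items (fun q => q.1)

-- ===== PORT B =====
def cluster_by_num_reagents_alt (leading_lists : List (List (List String))) (subordinate_lists : List (List (List String))) : List (Int × List (List (List String) × List (List String))) :=
  let entries := (leading_lists.zip subordinate_lists).flatMap
    (fun p => p.1.map (fun l2 => ((PySem.List.len l2 : Int), p)))
  let keys := PySem.List.sorted (PySem.Set.ofList (entries.map Prod.fst)) (fun k => k)
  keys.map (fun k => (k, (entries.filter (fun e => e.1 == k)).map Prod.snd))

-- ===== PRECONDITION & SPEC =====
def Spec_cluster_by_num_reagents (leading_lists : List (List (List String))) (subordinate_lists : List (List (List String))) (out : List (Int × List (List (List String) × List (List String)))) : Prop := out = cluster_by_num_reagents_alt leading_lists subordinate_lists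
instance (leading_lists : List (List (List String))) (subordinate_lists : List (List (List String))) (out : List (Int × List (List (List String) × List (List String)))) : Decidable (Spec_cluster_by_num_reagents leading_lists subordinate_lists out) := by unfold Spec_cluster_by_num_reagents; infer_instance

-- ===== CLAIM (what is proved, stated in full; the proofs are below) =====
def Claim_equal_cluster_by_num_reagents : Prop := ∀ (leading_lists : List (List (List String))) (subordinate_lists : List (List (List String))), Dom_cluster_by_num_reagents leading_lists subordinate_lists → Spec_cluster_by_num_reagents leading_lists subordinate_lists (cluster_by_num_reagents leading_lists subordinate_lists)

-- ===== LEMMAS AND PROOFS =====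

-- insertBy keyed on the first component commutes with mapping a section g of Prod.fst
lemma insertBy_fst_map {β : Type} (g : Int → Int × β) (hg : ∀ k, (g k).1 = k) (x : Int) (ks : List Int) :
    PySem.List.insertBy (fun a b => decide (a.1 < b.1)) (g x) (ks.map g)
      = (PySem.List.insertBy (fun a b => decide (a < b)) x ks).map g := by
  induction ks with
  | nil => simp [PySem.List.insertBy]
  | cons y t ih => simp [PySem.List.insertBy, hg]; split_ifs <;> simp [ih]

lemma foldl_insertBy_fst_map {β : Type} (g : Int → Int × β) (hg : ∀ k, (g k).1 = k)
    (ks ms : List Int) :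
    ks.foldl (fun acc x => PySem.List.insertBy (fun a b => decide (a.1 < b.1)) (g x) acc) (ms.map g)
      = (ks.foldl (fun acc x => PySem.List.insertBy (fun a b => decide (a < b)) x acc) ms).map g := by
  induction ks generalizing ms with
  | nil => rfl
  | cons x t ih =>
      simp only [List.foldl_cons]
      rw [insertBy_fst_map g hg, ih]

-- sorting pairs by their first component = sorting the keys and mapping g back over them
lemma sorted_fst_map {β : Type} (g : Int → Int × β) (hg : ∀ k, (g k).1 = k) (ks : List Int) :
    PySem.List.sorted (ks.map g) (fun q => q.1)
      = (PySem.List.sorted ks (fun k => k)).map g := by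
  rw [PySem.List.sorted_eq_foldl_insertBy, PySem.List.sorted_eq_foldl_insertBy, List.foldl_map]
  simpa using foldl_insertBy_fst_map g hg ks []

-- ===== VERDICT (by name: the statement is the Claim_ definition above) =====
theorem cluster_by_num_reagents_spec : Claim_equal_cluster_by_num_reagents := by
  intro L S _
  unfold Spec_cluster_by_num_reagents
  simp only [cluster_by_num_reagents, cluster_by_num_reagents_alt]
  -- A's nested bucket loop is the single fold of the flattened entry list
  have hfold : (L.zip S).foldl
      (fun d p => p.1.foldl (fun d l2 => d.modify (PySem.List.len l2) [] (fun v => v ++ [p])) d)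
      PySem.Dict.empty
    = ((L.zip S).flatMap (fun p => p.1.map (fun l2 => ((PySem.List.len l2 : Int), p)))).foldl
      (fun d e => d.modify e.1 [] (fun v => v ++ [e.2])) PySem.Dict.empty := by
    rw [List.foldl_flatMap]
    simp only [List.foldl_map]
  rw [hfold]
  set E := (L.zip S).flatMap (fun p => p.1.map (fun l2 => ((PySem.List.len l2 : Int), p))) with hE
  have hnd : ((E.foldl (fun d e => d.modify e.1 [] (fun v => v ++ [e.2])) PySem.Dict.empty)).keys.Nodup :=
    PySem.Dict.nodup_keys_foldl_modify_key E Prod.fst [] (fun _ e v => v ++ [e.2]) _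
      (by simp [PySem.Dict.keys_empty])
  have hkeys : ((E.foldl (fun d e => d.modify e.1 [] (fun v => v ++ [e.2])) PySem.Dict.empty)).keys
      = PySem.Set.ofList (E.map Prod.fst) := by
    rw [PySem.Dict.keys_foldl_modify_key E Prod.fst [] (fun _ e v => v ++ [e.2])]
    simp [PySem.Set.update_nil_left, PySem.Dict.keys_empty]
  -- the dict's items are exactly one (key, filtered bucket) pair per distinct key
  have hitems : ((E.foldl (fun d e => d.modify e.1 [] (fun v => v ++ [e.2])) PySem.Dict.empty)).items
      = (PySem.Set.ofList (E.map Prod.fst)).map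
          (fun k => (k, (E.filter (fun e => e.1 == k)).map Prod.snd)) := by
    rw [PySem.Dict.items_eq_map_keys _ hnd [], hkeys]
    apply List.map_congr_left
    intro k _
    rw [PySem.Dict.getD_foldl_modify_append]
    simp [PySem.Dict.getD_empty]
  rw [hitems, sorted_fst_map _ (fun k => rfl)]
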